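-- pv_equiv track=rewrite | github.com/JosephDefonse/agentic | python/samples/getting_started/agentic_housing/app.py | _map_area_info
-- ===== SOURCE A (Python) =====
-- from collections import defaultdict
--
-- def _key_suburb(s: str) -> str:
--     # Normalize suburb key (trim + preserve original spelling from CE)
--     return (s or "").strip()
--
-- def _map_area_info(
--     ptv_json: dict,
--     schools_json: dict,
--     restaurants_json: dict,
--     property_rows: list[dict],
-- ) -> dict:
--     area: dict[str, dict[str, list[str]]] = defaultdict(
--         lambda: {"schools": [], "ptv": [], "restaurants": []}
--     )
--
--     # seed keys from properties so AREA_INFO has entries for all suburbs with listings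
--     for p in property_rows:
--         _ = area[_key_suburb(p.get("suburb") or "")]
--
--     for it in ptv_json.get("value", []):
--         suburb = _key_suburb(it.get("cr54b_suburb"))
--         name = (it.get("cr54b_name") or "").strip()
--         if suburb and name and name not in area[suburb]["ptv"]:
--             area[suburb]["ptv"].append(name)
--
--     for it in schools_json.get("value", []):
--         suburb = _key_suburb(it.get("cr54b_suburb"))
--         name = (it.get("cr54b_name") or "").strip()
--         if suburb and name and name not in area[suburb]["schools"]:
--             area[suburb]["schools"].append(name)
--
--     for it in restaurants_json.get("value", []):
--         suburb = _key_suburb(it.get("cr54b_suburb"))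
--         name = (it.get("cr54b_name") or "").strip()
--         if suburb and name and name not in area[suburb]["restaurants"]:
--             area[suburb]["restaurants"].append(name)
--
--     # cast defaultdict to regular dict for cleanliness
--     return {k: v for k, v in area.items()}
-- ===== SOURCE B (Python) =====
-- def _map_area_info(
--     ptv_json: dict,
--     schools_json: dict,
--     restaurants_json: dict,
--     property_rows: list[dict],
-- ) -> dict:
--     # Pure group-by: extract (suburb, name) pairs per category, compute the key
--     # order once, then build each suburb's entry by filtering + ordered dedup.
--     def pairs(js: dict) -> list[tuple[str, str]]:
--         out = []
--         for it in js.get("value", []):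
--             s = (it.get("cr54b_suburb") or "").strip()
--             n = (it.get("cr54b_name") or "").strip()
--             if s and n:
--                 out.append((s, n))
--         return out
--
--     pt, sc, rs = pairs(ptv_json), pairs(schools_json), pairs(restaurants_json)
--
--     keys = list(dict.fromkeys(
--         [(p.get("suburb") or "").strip() for p in property_rows]
--         + [s for s, _ in pt] + [s for s, _ in sc] + [s for s, _ in rs]))
--
--     def names(ps: list[tuple[str, str]], k: str) -> list[str]:
--         return list(dict.fromkeys([n for s, n in ps if s == k]))
--
--     return {k: {"schools": names(sc, k), "ptv": names(pt, k), "restaurants": names(rs, k)}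
--             for k in keys}
-- ===== Notes on version B (the rewrite author's own statement) =====
-- stated objective: alternative
-- what changed: B replaces A's imperative defaultdict mutation (seed touches plus three append-with-in-list-dedup loops over one shared dict) by a pure group-by: it first extracts the (suburb, name) pairs of each category, computes the suburb key order once with dict.fromkeys, and then builds every suburb's entry by filtering each category's pairs and deduplicating with dict.fromkeys.
import Mathlib
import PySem

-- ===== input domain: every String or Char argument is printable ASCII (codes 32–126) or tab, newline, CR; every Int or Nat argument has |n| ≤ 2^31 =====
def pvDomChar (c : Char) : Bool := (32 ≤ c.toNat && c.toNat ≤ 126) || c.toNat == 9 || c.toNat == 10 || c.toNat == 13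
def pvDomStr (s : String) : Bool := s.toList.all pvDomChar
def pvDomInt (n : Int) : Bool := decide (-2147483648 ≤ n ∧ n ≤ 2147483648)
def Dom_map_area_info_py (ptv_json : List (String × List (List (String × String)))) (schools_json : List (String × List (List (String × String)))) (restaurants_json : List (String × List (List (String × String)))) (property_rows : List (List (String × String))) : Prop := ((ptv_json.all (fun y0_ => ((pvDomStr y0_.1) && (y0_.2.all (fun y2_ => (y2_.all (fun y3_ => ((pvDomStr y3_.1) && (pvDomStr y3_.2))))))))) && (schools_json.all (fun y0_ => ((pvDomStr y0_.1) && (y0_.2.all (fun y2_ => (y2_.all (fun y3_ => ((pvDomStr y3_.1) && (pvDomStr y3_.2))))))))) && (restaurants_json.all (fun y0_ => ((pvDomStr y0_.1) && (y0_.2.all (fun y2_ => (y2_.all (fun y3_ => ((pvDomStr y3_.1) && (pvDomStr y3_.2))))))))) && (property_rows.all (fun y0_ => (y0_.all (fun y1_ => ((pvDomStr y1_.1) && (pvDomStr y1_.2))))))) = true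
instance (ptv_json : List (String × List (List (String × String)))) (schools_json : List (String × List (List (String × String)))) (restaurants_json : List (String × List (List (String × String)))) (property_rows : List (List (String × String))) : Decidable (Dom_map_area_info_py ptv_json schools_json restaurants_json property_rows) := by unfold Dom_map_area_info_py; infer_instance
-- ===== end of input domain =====

-- ===== PORT A =====
-- B replaces A's defaultdict mutation by a pure group-by (pair extraction, one key-order
-- pass, per-key filter + ordered dedup); equal return value proved (A mutates nothing observable).

-- dict.get with first-match semantics on the association lists (shared accessor)
def pvRowGet (row : List (String × String)) (k : String) : String :=
  ((row.find? (fun p => p.1 == k)).map (fun p => p.2)).getD ""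

def pvValues (j : List (String × List (List (String × String)))) : List (List (String × String)) :=
  ((j.find? (fun p => p.1 == "value")).map (fun p => p.2)).getD []

def pvEmptyInfo : PySem.Dict String (List String) :=
  PySem.Dict.mk [("schools", []), ("ptv", []), ("restaurants", [])]

-- defaultdict access area[k]: create the default entry if the key is missing
def aTouch (area : PySem.Dict String (PySem.Dict String (List String))) (k : String) :
    PySem.Dict String (PySem.Dict String (List String)) :=
  if area.contains k then area else area.insert k pvEmptyInfo

-- body of each of A's three category loops (A repeats this code per category)
def aAdd (cat : String) (area : PySem.Dict String (PySem.Dict String (List String)))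
    (it : List (String × String)) : PySem.Dict String (PySem.Dict String (List String)) :=
  let suburb := PySem.Str.strip (pvRowGet it "cr54b_suburb")
  let name := PySem.Str.strip (pvRowGet it "cr54b_name")
  if suburb ≠ "" ∧ name ≠ "" then
    let area1 := aTouch area suburb
    let info := area1.getD suburb pvEmptyInfo
    let lst := info.getD cat []
    if name ∈ lst then area1
    else area1.insert suburb (info.insert cat (lst ++ [name]))
  else area

def map_area_info_py (ptv_json : List (String × List (List (String × String)))) (schools_json : List (String × List (List (String × String)))) (restaurants_json : List (String × List (List (String × String)))) (property_rows : List (List (String × String))) : List (String × List (String × List String)) :=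
  let area0 := property_rows.foldl
    (fun d p => aTouch d (PySem.Str.strip (pvRowGet p "suburb"))) PySem.Dict.empty
  let area1 := (pvValues ptv_json).foldl (aAdd "ptv") area0
  let area2 := (pvValues schools_json).foldl (aAdd "schools") area1
  let area3 := (pvValues restaurants_json).foldl (aAdd "restaurants") area2
  area3.items.map (fun kv => (kv.1, kv.2.items))

-- ===== PORT B =====
-- the (suburb, name) pairs of one category, guard 'if suburb and name' applied
def bPairs (j : List (String × List (List (String × String)))) : List (String × String) :=
  (pvValues j).filterMap (fun it =>
    let s := PySem.Str.strip (pvRowGet it "cr54b_suburb")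
    let n := PySem.Str.strip (pvRowGet it "cr54b_name")
    if s ≠ "" ∧ n ≠ "" then some (s, n) else none)

-- names of one category for one suburb: filter + ordered dedup (dict.fromkeys)
def bNames (ps : List (String × String)) (k : String) : List String :=
  PySem.List.dedup ((ps.filter (fun p => p.1 == k)).map Prod.snd)

def map_area_info_py_alt (ptv_json : List (String × List (List (String × String)))) (schools_json : List (String × List (List (String × String)))) (restaurants_json : List (String × List (List (String × String)))) (property_rows : List (List (String × String))) : List (String × List (String × List String)) :=
  let pt := bPairs ptv_json
  let sc := bPairs schools_json
  let rs := bPairs restaurants_json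
  let keys := PySem.List.dedup
    (property_rows.map (fun p => PySem.Str.strip (pvRowGet p "suburb"))
      ++ pt.map Prod.fst ++ sc.map Prod.fst ++ rs.map Prod.fst)
  keys.map (fun k =>
    (k, [("schools", bNames sc k), ("ptv", bNames pt k), ("restaurants", bNames rs k)]))

-- ===== PRECONDITION & SPEC =====
def Spec_map_area_info_py (ptv_json : List (String × List (List (String × String)))) (schools_json : List (String × List (List (String × String)))) (restaurants_json : List (String × List (List (String × String)))) (property_rows : List (List (String × String))) (out : List (String × List (String × List String))) : Prop := out = map_area_info_py_alt ptv_json schools_json restaurants_json property_rows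
instance (ptv_json : List (String × List (List (String × String)))) (schools_json : List (String × List (List (String × String)))) (restaurants_json : List (String × List (List (String × String)))) (property_rows : List (List (String × String))) (out : List (String × List (String × List String))) : Decidable (Spec_map_area_info_py ptv_json schools_json restaurants_json property_rows out) := by unfold Spec_map_area_info_py; infer_instance

-- ===== CLAIM (what is proved, stated in full; the proofs are below) =====
def Claim_equal_map_area_info_py : Prop := ∀ (ptv_json : List (String × List (List (String × String)))) (schools_json : List (String × List (List (String × String)))) (restaurants_json : List (String × List (List (String × String)))) (property_rows : List (List (String × String))), Dom_map_area_info_py ptv_json schools_json restaurants_json property_rows → Spec_map_area_info_py ptv_json schools_json restaurants_json property_rows (map_area_info_py ptv_json schools_json restaurants_json property_rows)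

-- ===== LEMMAS AND PROOFS =====

-- canonical shape of A's accumulator: a dict whose entries are (k, F k) for the key list ks
def stateOf (ks : List String) (F : String → PySem.Dict String (List String)) :
    PySem.Dict String (PySem.Dict String (List String)) :=
  PySem.Dict.mk (ks.map (fun k => (k, F k)))

-- one name added to one category of one info dict (the inner effect of aAdd)
def upd (cat : String) (n : String) (info : PySem.Dict String (List String)) :
    PySem.Dict String (List String) :=
  if n ∈ info.getD cat [] then info else info.insert cat (info.getD cat [] ++ [n])

-- the (suburb, name) pairs of the suffix still to be processed, per item
def extractIt (it : List (String × String)) : Option (String × String) :=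
  let s := PySem.Str.strip (pvRowGet it "cr54b_suburb")
  let n := PySem.Str.strip (pvRowGet it "cr54b_name")
  if s ≠ "" ∧ n ≠ "" then some (s, n) else none

def grp (ps : List (String × String)) (k : String) : List String :=
  (ps.filter (fun p => p.1 == k)).map Prod.snd

def mkInfo (a b c : List String) : PySem.Dict String (List String) :=
  PySem.Dict.mk [("schools", a), ("ptv", b), ("restaurants", c)]

theorem stateOf_congr (ks : List String) (F G : String → PySem.Dict String (List String))
    (h : ∀ k ∈ ks, F k = G k) : stateOf ks F = stateOf ks G := by
  apply PySem.Dict.ext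
  exact List.map_congr_left (fun k hk => by rw [h k hk])

theorem keys_stateOf (ks : List String) (F : String → PySem.Dict String (List String)) :
    (stateOf ks F).keys = ks := by
  simp [stateOf, PySem.Dict.keys, List.map_map, Function.comp_def]

theorem contains_stateOf (ks : List String) (F : String → PySem.Dict String (List String))
    (k : String) : (stateOf ks F).contains k = decide (k ∈ ks) := by
  rw [PySem.Dict.contains_eq_decide_mem_keys, keys_stateOf]

theorem find?_beq_self (ks : List String) (k : String) (hk : k ∈ ks) :
    ks.find? (fun a => a == k) = some k := by
  induction ks with
  | nil => cases hk
  | cons a t ih =>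
      by_cases h : a = k
      · simp [List.find?, h]
      · have ht : k ∈ t := by
          rcases List.mem_cons.mp hk with h2 | h2
          · exact absurd h2.symm h
          · exact h2
        have hb : (a == k) = false := by simp [h]
        simp [List.find?, hb, ih ht]

theorem get?_stateOf_mem (ks : List String) (F : String → PySem.Dict String (List String))
    (k : String) (hk : k ∈ ks) : (stateOf ks F).get? k = some (F k) := by
  have : (ks.map (fun a => (a, F a))).find? (fun p => p.1 == k)
      = (ks.find? (fun a => a == k)).map (fun a => (a, F a)) := by
    rw [List.find?_map]; rfl
  simp [stateOf, PySem.Dict.get?, this, find?_beq_self ks k hk]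

theorem getD_stateOf_mem (ks : List String) (F : String → PySem.Dict String (List String))
    (k : String) (hk : k ∈ ks) : (stateOf ks F).getD k pvEmptyInfo = F k := by
  rw [PySem.Dict.getD_eq_get?_getD, get?_stateOf_mem ks F k hk]; rfl

theorem insert_stateOf_mem (ks : List String) (F : String → PySem.Dict String (List String))
    (k : String) (x : PySem.Dict String (List String)) (hk : k ∈ ks) :
    (stateOf ks F).insert k x = stateOf ks (fun k' => if k' = k then x else F k') := by
  apply PySem.Dict.ext
  have hc : (stateOf ks F).contains k = true := by
    rw [contains_stateOf]; exact decide_eq_true hk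
  rw [PySem.Dict.items_insert, if_pos hc]
  show (ks.map _).map _ = ks.map _
  rw [List.map_map]
  apply List.map_congr_left
  intro a _
  by_cases h : a = k <;> simp [h]

theorem insert_stateOf_not_mem (ks : List String) (F : String → PySem.Dict String (List String))
    (k : String) (x : PySem.Dict String (List String)) (hk : k ∉ ks) :
    (stateOf ks F).insert k x = stateOf (ks ++ [k]) (fun k' => if k' = k then x else F k') := by
  apply PySem.Dict.ext
  have hc : (stateOf ks F).contains k = false := by
    rw [contains_stateOf]; exact decide_eq_false hk
  rw [PySem.Dict.items_insert, if_neg (by rw [hc]; exact Bool.false_ne_true)]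
  show ks.map _ ++ [(k, x)] = (ks ++ [k]).map _
  rw [List.map_append]
  congr 1
  · apply List.map_congr_left
    intro a ha
    have h : a ≠ k := fun h => hk (h ▸ ha)
    simp [h]
  · simp

theorem aTouch_stateOf (ks : List String) (F : String → PySem.Dict String (List String))
    (s : String) :
    aTouch (stateOf ks F) s =
      if s ∈ ks then stateOf ks F
      else stateOf (ks ++ [s]) (fun k => if k = s then pvEmptyInfo else F k) := by
  rw [aTouch, contains_stateOf]
  by_cases h : s ∈ ks
  · simp [h]
  · simp only [h, decide_false, Bool.false_eq_true, if_false]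
    exact insert_stateOf_not_mem ks F s pvEmptyInfo h

theorem getD_pvEmptyInfo (cat : String) : pvEmptyInfo.getD cat [] = [] := by
  simp only [pvEmptyInfo, PySem.Dict.getD_eq_get?_getD, PySem.Dict.get?_mk_cons]
  split_ifs <;> simp [PySem.Dict.get?]

-- seed: A's aTouch fold is a fold of PySem.Set.add over the stripped suburb keys
theorem seed_fold (rows : List (List (String × String))) (ks : List String) :
    rows.foldl (fun d p => aTouch d (PySem.Str.strip (pvRowGet p "suburb")))
      (stateOf ks (fun _ => pvEmptyInfo)) =
    stateOf (rows.foldl (fun s p => PySem.Set.add s (PySem.Str.strip (pvRowGet p "suburb"))) ks)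
      (fun _ => pvEmptyInfo) := by
  induction rows generalizing ks with
  | nil => rfl
  | cons p t ih =>
      simp only [List.foldl_cons]
      rw [aTouch_stateOf]
      by_cases h : PySem.Str.strip (pvRowGet p "suburb") ∈ ks
      · rw [if_pos h, PySem.Set.add_of_mem h]
        exact ih ks
      · rw [if_neg h, PySem.Set.add_of_not_mem h]
        have hf : (fun k => if k = PySem.Str.strip (pvRowGet p "suburb") then pvEmptyInfo else pvEmptyInfo)
            = (fun _ : String => pvEmptyInfo) := by
          funext k; rw [ite_self]
        rw [hf]
        exact ih _

-- one aAdd step on a canonical state: the item contributes no pair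
theorem aAdd_stateOf_none (cat : String) (it : List (String × String)) (ks : List String)
    (F : String → PySem.Dict String (List String)) (h : extractIt it = none) :
    aAdd cat (stateOf ks F) it = stateOf ks F := by
  simp only [extractIt] at h
  by_cases hg : PySem.Str.strip (pvRowGet it "cr54b_suburb") ≠ "" ∧
      PySem.Str.strip (pvRowGet it "cr54b_name") ≠ ""
  · rw [if_pos hg] at h; cases h
  · simp only [aAdd]; rw [if_neg hg]

-- one aAdd step on a canonical state: the item contributes the pair (s, n)
theorem aAdd_stateOf_some (cat : String) (it : List (String × String)) (ks : List String)
    (F : String → PySem.Dict String (List String)) (s n : String)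
    (h : extractIt it = some (s, n)) :
    aAdd cat (stateOf ks F) it =
      stateOf (PySem.Set.add ks s)
        (fun k => if k = s then upd cat n (if s ∈ ks then F s else pvEmptyInfo) else F k) := by
  simp only [extractIt] at h
  by_cases hg : PySem.Str.strip (pvRowGet it "cr54b_suburb") ≠ "" ∧
      PySem.Str.strip (pvRowGet it "cr54b_name") ≠ ""
  · rw [if_pos hg] at h
    have hs : PySem.Str.strip (pvRowGet it "cr54b_suburb") = s := congrArg Prod.fst (Option.some.inj h)
    have hn : PySem.Str.strip (pvRowGet it "cr54b_name") = n := congrArg Prod.snd (Option.some.inj h)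
    simp only [aAdd]
    rw [if_pos hg, hs, hn]
    rw [aTouch_stateOf]
    by_cases hm : s ∈ ks
    · rw [if_pos hm, PySem.Set.add_of_mem hm, getD_stateOf_mem ks F s hm, if_pos hm]
      simp only [upd]
      by_cases hmem : n ∈ (F s).getD cat []
      · rw [if_pos hmem, if_pos hmem]
        apply stateOf_congr
        intro k _
        by_cases hk : k = s <;> simp [hk]
      · rw [if_neg hmem, if_neg hmem, insert_stateOf_mem ks F s _ hm]
    · rw [if_neg hm, PySem.Set.add_of_not_mem hm]
      have hsm : s ∈ ks ++ [s] := List.mem_append.mpr (Or.inr (List.mem_singleton.mpr rfl))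
      rw [getD_stateOf_mem _ _ s hsm, if_pos rfl, getD_pvEmptyInfo, if_neg hm]
      simp only [upd, getD_pvEmptyInfo]
      have hnil : ¬ (n ∈ ([] : List String)) := List.not_mem_nil
      rw [if_neg hnil, if_neg hnil, List.nil_append, insert_stateOf_mem _ _ s _ hsm]
      apply stateOf_congr
      intro k _
      by_cases hk : k = s <;> simp [hk]
  · rw [if_neg hg] at h; cases h

-- one whole category pass on a canonical state
theorem pass_eq (cat : String) (items : List (List (String × String))) (ks : List String)
    (F : String → PySem.Dict String (List String)) :
    items.foldl (aAdd cat) (stateOf ks F) =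
      stateOf ((items.filterMap extractIt).foldl (fun s p => PySem.Set.add s p.1) ks)
        (fun k => (grp (items.filterMap extractIt) k).foldl (fun info n => upd cat n info)
          (if k ∈ ks then F k else pvEmptyInfo)) := by
  induction items generalizing ks F with
  | nil =>
      apply stateOf_congr
      intro k hk
      simp [grp, hk]
  | cons it rest ih =>
      simp only [List.foldl_cons, List.filterMap_cons]
      cases hext : extractIt it with
      | none => rw [aAdd_stateOf_none cat it ks F hext]; exact ih ks F
      | some p =>
          obtain ⟨s, n⟩ := p
          rw [aAdd_stateOf_some cat it ks F s n hext]
          rw [ih]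
          simp only [List.foldl_cons]
          apply congrArg
          funext k
          by_cases hk : k = s
          · subst hk
            have hb : ((k, n).1 == k) = true := by simp
            simp only [grp, List.filter_cons, hb, if_pos, List.map_cons, List.foldl_cons]
            have hself : k ∈ PySem.Set.add ks k := (PySem.Set.mem_add ks k k).mpr (Or.inr rfl)
            rw [if_pos hself]
          · have hb : ((s, n).1 == k) = false := by simp [Ne.symm hk]
            simp only [grp, List.filter_cons, hb, Bool.false_eq_true, if_false]
            have hfk : (if k = s then upd cat n (if s ∈ ks then F s else pvEmptyInfo) else F k) = F k :=
              if_neg hk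
            rw [hfk]
            by_cases hks : k ∈ ks
            · rw [if_pos ((PySem.Set.mem_add ks s k).mpr (Or.inl hks)), if_pos hks]
            · have : k ∉ PySem.Set.add ks s := fun h => by
                rcases (PySem.Set.mem_add ks s k).mp h with h | h
                · exact hks h
                · exact hk h
              rw [if_neg this, if_neg hks]

theorem mem_foldl_add (l : List String) (ks : List String) (k : String) (hk : k ∈ ks) :
    k ∈ l.foldl (fun s x => PySem.Set.add s x) ks := by
  induction l generalizing ks with
  | nil => exact hk
  | cons a t ih => exact ih _ (by rw [PySem.Set.mem_add]; exact Or.inl hk)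

theorem mem_foldl_add_of_mem (l : List String) (ks : List String) (k : String) (hk : k ∈ l) :
    k ∈ l.foldl (fun s x => PySem.Set.add s x) ks := by
  induction l generalizing ks with
  | nil => cases hk
  | cons a t ih =>
      rcases List.mem_cons.mp hk with h | h
      · subst h; exact mem_foldl_add t _ k (by rw [PySem.Set.mem_add]; exact Or.inr rfl)
      · exact ih _ h

theorem grp_eq_nil_of_not_mem (ps : List (String × String)) (k : String)
    (hk : k ∉ ps.map Prod.fst) : grp ps k = [] := by
  have h : ps.filter (fun p => p.1 == k) = [] := by
    rw [List.filter_eq_nil_iff]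
    intro p hp
    simp only [beq_iff_eq]
    exact fun h => hk (h ▸ List.mem_map_of_mem hp)
  simp [grp, h]

-- computing the upd folds on a concrete three-field info dict
theorem getD_mkInfo_schools (a b c : List String) : (mkInfo a b c).getD "schools" [] = a := by
  simp [mkInfo, PySem.Dict.getD_eq_get?_getD, PySem.Dict.get?_mk_cons]

theorem getD_mkInfo_ptv (a b c : List String) : (mkInfo a b c).getD "ptv" [] = b := by
  simp [mkInfo, PySem.Dict.getD_eq_get?_getD, PySem.Dict.get?_mk_cons]

theorem getD_mkInfo_restaurants (a b c : List String) : (mkInfo a b c).getD "restaurants" [] = c := by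
  simp [mkInfo, PySem.Dict.getD_eq_get?_getD, PySem.Dict.get?_mk_cons]

theorem insert_mkInfo_schools (a b c x : List String) :
    (mkInfo a b c).insert "schools" x = mkInfo x b c := by
  apply PySem.Dict.ext; simp [mkInfo, PySem.Dict.items_insert, PySem.Dict.contains]

theorem insert_mkInfo_ptv (a b c x : List String) :
    (mkInfo a b c).insert "ptv" x = mkInfo a x c := by
  apply PySem.Dict.ext; simp [mkInfo, PySem.Dict.items_insert, PySem.Dict.contains]

theorem insert_mkInfo_restaurants (a b c x : List String) :
    (mkInfo a b c).insert "restaurants" x = mkInfo a b x := by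
  apply PySem.Dict.ext; simp [mkInfo, PySem.Dict.items_insert, PySem.Dict.contains]

theorem upd_schools (n : String) (a b c : List String) :
    upd "schools" n (mkInfo a b c) = mkInfo (PySem.Set.add a n) b c := by
  rw [upd, getD_mkInfo_schools, insert_mkInfo_schools]
  by_cases hn : n ∈ a
  · rw [if_pos hn, PySem.Set.add_of_mem hn]
  · rw [if_neg hn, PySem.Set.add_of_not_mem hn]

theorem upd_ptv (n : String) (a b c : List String) :
    upd "ptv" n (mkInfo a b c) = mkInfo a (PySem.Set.add b n) c := by
  rw [upd, getD_mkInfo_ptv, insert_mkInfo_ptv]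
  by_cases hn : n ∈ b
  · rw [if_pos hn, PySem.Set.add_of_mem hn]
  · rw [if_neg hn, PySem.Set.add_of_not_mem hn]

theorem upd_restaurants (n : String) (a b c : List String) :
    upd "restaurants" n (mkInfo a b c) = mkInfo a b (PySem.Set.add c n) := by
  rw [upd, getD_mkInfo_restaurants, insert_mkInfo_restaurants]
  by_cases hn : n ∈ c
  · rw [if_pos hn, PySem.Set.add_of_mem hn]
  · rw [if_neg hn, PySem.Set.add_of_not_mem hn]

theorem foldl_upd_schools (ns : List String) (a b c : List String) :
    ns.foldl (fun info n => upd "schools" n info) (mkInfo a b c) =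
      mkInfo (ns.foldl PySem.Set.add a) b c := by
  induction ns generalizing a with
  | nil => rfl
  | cons n t ih => simp only [List.foldl_cons, upd_schools]; exact ih _

theorem foldl_upd_ptv (ns : List String) (a b c : List String) :
    ns.foldl (fun info n => upd "ptv" n info) (mkInfo a b c) =
      mkInfo a (ns.foldl PySem.Set.add b) c := by
  induction ns generalizing b with
  | nil => rfl
  | cons n t ih => simp only [List.foldl_cons, upd_ptv]; exact ih _

theorem foldl_upd_restaurants (ns : List String) (a b c : List String) :
    ns.foldl (fun info n => upd "restaurants" n info) (mkInfo a b c) =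
      mkInfo a b (ns.foldl PySem.Set.add c) := by
  induction ns generalizing c with
  | nil => rfl
  | cons n t ih => simp only [List.foldl_cons, upd_restaurants]; exact ih _

theorem bNames_eq (ps : List (String × String)) (k : String) :
    bNames ps k = (grp ps k).foldl PySem.Set.add [] := by
  rw [bNames, grp, PySem.List.dedup_eq_ofList, PySem.Set.ofList_eq_foldl]

-- ===== VERDICT (by name: the statement is the Claim_ definition above) =====
-- B's pair extraction is the filterMap of extractIt (definitional)
theorem bPairs_eq (j : List (String × List (List (String × String)))) :
    bPairs j = (pvValues j).filterMap extractIt := rfl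

theorem pvEmptyInfo_eq : pvEmptyInfo = mkInfo [] [] [] := rfl

-- a key outside the accumulated key set of a pass has no pairs in that pass
theorem grp_of_not_mem_pass (ps : List (String × String)) (ks : List String) (k : String)
    (hk : k ∉ ps.foldl (fun s p => PySem.Set.add s p.1) ks) : grp ps k = [] := by
  apply grp_eq_nil_of_not_mem
  intro hm
  apply hk
  rw [show (ps.foldl (fun s p => PySem.Set.add s p.1) ks)
      = ((ps.map Prod.fst).foldl PySem.Set.add ks) from (List.foldl_map).symm]
  exact mem_foldl_add_of_mem _ ks k hm

theorem mem_foldl_add_pairs (l : List (String × String)) (ks : List String) (k : String)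
    (hk : k ∈ ks) : k ∈ l.foldl (fun s p => PySem.Set.add s p.1) ks := by
  rw [show (l.foldl (fun s p => PySem.Set.add s p.1) ks)
      = ((l.map Prod.fst).foldl PySem.Set.add ks) from (List.foldl_map).symm]
  exact mem_foldl_add _ ks k hk

theorem map_area_info_py_spec : Claim_equal_map_area_info_py := by
  intro ptv schools rest rows _
  unfold Spec_map_area_info_py map_area_info_py map_area_info_py_alt
  simp only [bPairs_eq]
  have h0 : PySem.Dict.empty = stateOf [] (fun _ => pvEmptyInfo) := rfl
  rw [h0, seed_fold rows [], pass_eq "ptv" (pvValues ptv), pass_eq "schools" (pvValues schools),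
    pass_eq "restaurants" (pvValues rest)]
  -- abbreviations for the three pair lists and the accumulated key sets
  set pt := (pvValues ptv).filterMap extractIt with hpt
  set sc := (pvValues schools).filterMap extractIt with hsc
  set rs := (pvValues rest).filterMap extractIt with hrs
  set S0 := rows.foldl (fun s p => PySem.Set.add s (PySem.Str.strip (pvRowGet p "suburb"))) [] with hS0
  set S1 := pt.foldl (fun s p => PySem.Set.add s p.1) S0 with hS1
  set S2 := sc.foldl (fun s p => PySem.Set.add s p.1) S1 with hS2
  set S3 := rs.foldl (fun s p => PySem.Set.add s p.1) S2 with hS3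
  -- the value function after the three passes, in closed form
  have hval : ∀ k : String,
      (grp rs k).foldl (fun info n => upd "restaurants" n info)
        (if k ∈ S2 then
          (grp sc k).foldl (fun info n => upd "schools" n info)
            (if k ∈ S1 then
              (grp pt k).foldl (fun info n => upd "ptv" n info)
                (if k ∈ S0 then pvEmptyInfo else pvEmptyInfo)
              else pvEmptyInfo)
          else pvEmptyInfo) =
      mkInfo ((grp sc k).foldl PySem.Set.add []) ((grp pt k).foldl PySem.Set.add [])
        ((grp rs k).foldl PySem.Set.add []) := by
    intro k
    have h1 : (grp pt k).foldl (fun info n => upd "ptv" n info)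
        (if k ∈ S0 then pvEmptyInfo else pvEmptyInfo)
        = mkInfo [] ((grp pt k).foldl PySem.Set.add []) [] := by
      rw [ite_self, pvEmptyInfo_eq, foldl_upd_ptv]
    have h2 : (if k ∈ S1 then (grp pt k).foldl (fun info n => upd "ptv" n info)
          (if k ∈ S0 then pvEmptyInfo else pvEmptyInfo) else pvEmptyInfo)
        = mkInfo [] ((grp pt k).foldl PySem.Set.add []) [] := by
      by_cases hk1 : k ∈ S1
      · rw [if_pos hk1, h1]
      · rw [if_neg hk1, grp_of_not_mem_pass pt S0 k (hS1 ▸ hk1), List.foldl_nil, pvEmptyInfo_eq]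
    have h3 : (if k ∈ S2 then (grp sc k).foldl (fun info n => upd "schools" n info)
          (if k ∈ S1 then (grp pt k).foldl (fun info n => upd "ptv" n info)
            (if k ∈ S0 then pvEmptyInfo else pvEmptyInfo) else pvEmptyInfo) else pvEmptyInfo)
        = mkInfo ((grp sc k).foldl PySem.Set.add []) ((grp pt k).foldl PySem.Set.add []) [] := by
      by_cases hk2 : k ∈ S2
      · rw [if_pos hk2, h2, foldl_upd_schools]
      · have hk1 : k ∉ S1 := fun h => hk2 (hS2 ▸ mem_foldl_add_pairs sc S1 k h)
        rw [if_neg hk2, grp_of_not_mem_pass sc S1 k (hS2 ▸ hk2), List.foldl_nil,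
          grp_of_not_mem_pass pt S0 k (hS1 ▸ hk1), List.foldl_nil, pvEmptyInfo_eq]
    rw [h3, foldl_upd_restaurants]
  -- assemble: items of the canonical state, keys, and per-key values
  have hkeys : S3 = PySem.List.dedup
      (rows.map (fun p => PySem.Str.strip (pvRowGet p "suburb"))
        ++ pt.map Prod.fst ++ sc.map Prod.fst ++ rs.map Prod.fst) := by
    rw [PySem.List.dedup_eq_ofList, PySem.Set.ofList_eq_foldl]
    rw [List.foldl_append, List.foldl_append, List.foldl_append]
    rw [hS3, hS2, hS1, hS0]
    rw [show ∀ (l : List (String × String)) (init : List String),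
        l.foldl (fun s p => PySem.Set.add s p.1) init = (l.map Prod.fst).foldl PySem.Set.add init
      from fun l init => (List.foldl_map).symm,
      show ∀ (l : List (List (String × String))) (init : List String),
        l.foldl (fun s p => PySem.Set.add s (PySem.Str.strip (pvRowGet p "suburb"))) init
          = (l.map (fun p => PySem.Str.strip (pvRowGet p "suburb"))).foldl PySem.Set.add init
      from fun l init => (List.foldl_map).symm]
    rw [show ∀ (l : List (String × String)) (init : List String),
        l.foldl (fun s p => PySem.Set.add s p.1) init = (l.map Prod.fst).foldl PySem.Set.add init
      from fun l init => (List.foldl_map).symm]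
    rw [show ∀ (l : List (String × String)) (init : List String),
        l.foldl (fun s p => PySem.Set.add s p.1) init = (l.map Prod.fst).foldl PySem.Set.add init
      from fun l init => (List.foldl_map).symm]
  rw [hkeys]
  show List.map _ (List.map _ _) = _
  rw [List.map_map]
  apply List.map_congr_left
  intro k _
  simp only [Function.comp_apply]
  rw [hval k]
  rw [bNames_eq, bNames_eq, bNames_eq]
  rfl
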